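-- pv_equiv track=rewrite | github.com/alexlimatds/bracis_2023 | dfcsc_cls_models.py | core_sentences_idx
-- ===== SOURCE A (Python) =====
-- def n_tokens_in_core_sentences(idx_first_sent, idx_last_sent, tokenized_sentences):
--     '''
--     Computes the number of tokens from a set of core sentences.
--     Arguments:
--         idx_first_sent: index of the first core sentence (integer).
--         idx_last_sent: index of the last core sentence (integer).
--         tokenized_sentences: the representation of a tokenized chunk as a list (sentences) of list of integers (token IDs).
--     Returns:
--         The number of tokens in the sequence of sentences indicated by the idx_first_sent and idx_last_sent arguments.
--     '''
--     n = 0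
--     for i in range(idx_first_sent, idx_last_sent + 1):
--         n += (len(tokenized_sentences[i]) + 1) # +1 because future SEP token
--     return n
--
-- def core_sentences_idx(tokenized_sentences, max_seq_len, min_context_len):
--     '''
--     Sets the number of chunks and their respective core sentences.
--     Arguments:
--         max_seq_len: maximum number of tokens in a chunk.
--         min_context_len: desired minimum number of edge tokens.
--         tokenized_sentences: list (sentences) of list (tokens in a sentence) of integers (token IDs).
--     Returns:
--         List of tuples. Each tuple represents a chunk and it has two
--         integers which are the index of first and last core sentence in the chunk.
--     '''
--     threshold_ctx = max_seq_len - min_context_len - 2 # -2 because CLS and first SEP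
--
--     n_sentences = len(tokenized_sentences)
--     idx_core_sentences = [] # list of tuple of 2 integers (indexes of first and last core sentences in a chunk)
--     idx_current_sent = 0
--     while idx_current_sent < n_sentences:
--         # new chunk
--         idx_start = idx_current_sent # begining of current chunk
--         idx_end = idx_current_sent   # end of current chunk
--         idx_current_sent += 1
--         len_core_sent_in_chunk = n_tokens_in_core_sentences(idx_start, idx_end, tokenized_sentences)
--         while len_core_sent_in_chunk < threshold_ctx and idx_current_sent < n_sentences:
--             # checking if current sentence fits into the current chunk while maintain minimum context length
--             if len_core_sent_in_chunk + len(tokenized_sentences[idx_current_sent]) < threshold_ctx: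
--                 idx_end = idx_current_sent
--                 idx_current_sent += 1
--                 len_core_sent_in_chunk = n_tokens_in_core_sentences(idx_start, idx_end, tokenized_sentences)
--             else:
--                 break
--         idx_core_sentences.append((idx_start, idx_end))
--     return idx_core_sentences
-- ===== SOURCE B (Python) =====
-- def core_sentences_idx(tokenized_sentences, max_seq_len, min_context_len):
--     threshold_ctx = max_seq_len - min_context_len - 2
--     n = len(tokenized_sentences)
--     # prefix[k] = number of tokens (with one SEP per sentence) in the first k sentences
--     prefix = [0]
--     for s in tokenized_sentences:
--         prefix.append(prefix[-1] + len(s) + 1)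
--     chunks = []
--     i = 0
--     while i < n:
--         start = i
--         i += 1
--         # extend the chunk while the whole chunk (incl. one SEP per sentence,
--         # minus the trailing SEP) stays strictly below the threshold
--         while i < n and prefix[i + 1] - prefix[start] <= threshold_ctx:
--             i += 1
--         chunks.append((start, i - 1))
--     return chunks
-- ===== Notes on version B (the rewrite author's own statement) =====
-- stated objective: alternative
-- what changed: B precomputes a prefix-sum array of sentence token counts in one pass and decides chunk boundaries by comparing two prefix values with a single condition, instead of A's nested rescan of the chunk range (n_tokens_in_core_sentences) after every extension under a three-part loop condition.
import Mathlib
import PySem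

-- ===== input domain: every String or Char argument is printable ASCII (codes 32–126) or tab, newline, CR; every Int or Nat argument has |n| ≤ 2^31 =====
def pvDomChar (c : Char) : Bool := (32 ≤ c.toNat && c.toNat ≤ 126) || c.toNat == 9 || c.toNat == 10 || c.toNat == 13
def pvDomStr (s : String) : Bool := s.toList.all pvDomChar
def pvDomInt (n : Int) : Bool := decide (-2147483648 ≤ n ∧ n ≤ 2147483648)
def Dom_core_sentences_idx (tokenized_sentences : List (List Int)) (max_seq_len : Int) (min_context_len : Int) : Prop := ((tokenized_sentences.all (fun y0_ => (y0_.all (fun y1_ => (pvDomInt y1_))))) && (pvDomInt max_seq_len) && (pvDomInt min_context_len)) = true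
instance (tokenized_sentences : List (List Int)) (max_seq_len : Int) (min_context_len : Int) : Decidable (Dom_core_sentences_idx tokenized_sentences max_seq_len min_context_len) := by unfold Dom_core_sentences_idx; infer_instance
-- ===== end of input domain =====

-- B replaces A's per-step rescan of the chunk (n_tokens_in_core_sentences) by a
-- precomputed prefix-sum array of token counts queried with a single comparison.


-- ===== PORT A =====
-- n_tokens_in_core_sentences: sum of (len(ts[i]) + 1) for i in range(a, b+1).
-- Indices are Nats here; A only calls it with in-range indices, so List.getD is exact.
def pvNTokens (ts : List (List Int)) (a b : Nat) : Int :=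
  (List.range' a (b + 1 - a)).foldl (fun n i => n + ((ts.getD i []).length + 1 : Int)) 0

-- inner while loop of A: state (idx_start, idx_end, idx_current_sent, len_core_sent_in_chunk);
-- fuel only makes the loop total (it is never exhausted for the fuel A's port passes).
def pvAInner (ts : List (List Int)) (thr : Int) (n : Nat) :
    Nat → Nat → Nat → Nat → Int → Nat × Nat
  | 0, _, idx_end, i, _ => (idx_end, i)
  | fuel + 1, idx_start, idx_end, i, len =>
    if len < thr ∧ i < n then
      if len + ((ts.getD i []).length : Int) < thr then
        pvAInner ts thr n fuel idx_start i (i + 1) (pvNTokens ts idx_start i)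
      else (idx_end, i)
    else (idx_end, i)

-- outer while loop of A
def pvAOuter (ts : List (List Int)) (thr : Int) (n : Nat) : Nat → Nat → List (Int × Int)
  | 0, _ => []
  | fuel + 1, i =>
    if i < n then
      let r := pvAInner ts thr n (n + 1) i i (i + 1) (pvNTokens ts i i)
      ((i : Int), (r.1 : Int)) :: pvAOuter ts thr n fuel r.2
    else []

def core_sentences_idx (tokenized_sentences : List (List Int)) (max_seq_len : Int) (min_context_len : Int) : List (Int × Int) :=
  pvAOuter tokenized_sentences (max_seq_len - min_context_len - 2) tokenized_sentences.length
    (tokenized_sentences.length + 1) 0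

-- ===== PORT B =====
-- the prefix-sum array: prefix = [0]; for s in ts: prefix.append(prefix[-1] + len(s) + 1)
-- (prefix[-1]: the accumulator list is always nonempty, so getLastD is exact here)
def pvPrefix (ts : List (List Int)) : List Int :=
  ts.foldl (fun p s => p ++ [p.getLastD 0 + s.length + 1]) [0]

-- inner while loop of B: advance i while the prefix-sum difference stays within the threshold
def pvBAdv (P : List Int) (thr : Int) (n start : Nat) : Nat → Nat → Nat
  | 0, i => i
  | fuel + 1, i =>
    if i < n ∧ P.getD (i + 1) 0 - P.getD start 0 ≤ thr then
      pvBAdv P thr n start fuel (i + 1)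
    else i

-- outer while loop of B
def pvBLoop (P : List Int) (thr : Int) (n : Nat) : Nat → Nat → List (Int × Int)
  | 0, _ => []
  | fuel + 1, i =>
    if i < n then
      let i' := pvBAdv P thr n i (n + 1) (i + 1)
      ((i : Int), ((i' - 1 : Nat) : Int)) :: pvBLoop P thr n fuel i'
    else []

def core_sentences_idx_alt (tokenized_sentences : List (List Int)) (max_seq_len : Int) (min_context_len : Int) : List (Int × Int) :=
  pvBLoop (pvPrefix tokenized_sentences) (max_seq_len - min_context_len - 2)
    tokenized_sentences.length (tokenized_sentences.length + 1) 0

-- ===== PRECONDITION & SPEC =====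
def Spec_core_sentences_idx (tokenized_sentences : List (List Int)) (max_seq_len : Int) (min_context_len : Int) (out : List (Int × Int)) : Prop := out = core_sentences_idx_alt tokenized_sentences max_seq_len min_context_len
instance (tokenized_sentences : List (List Int)) (max_seq_len : Int) (min_context_len : Int) (out : List (Int × Int)) : Decidable (Spec_core_sentences_idx tokenized_sentences max_seq_len min_context_len out) := by unfold Spec_core_sentences_idx; infer_instance

-- ===== CLAIM (what is proved, stated in full; the proofs are below) =====
def Claim_equal_core_sentences_idx : Prop := ∀ (tokenized_sentences : List (List Int)) (max_seq_len : Int) (min_context_len : Int), Dom_core_sentences_idx tokenized_sentences max_seq_len min_context_len → Spec_core_sentences_idx tokenized_sentences max_seq_len min_context_len (core_sentences_idx tokenized_sentences max_seq_len min_context_len)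

-- ===== LEMMAS AND PROOFS =====

-- total token count (with one SEP per sentence) of a sentence list
def pvSumL (xs : List (List Int)) : Int := (xs.map (fun s => (s.length : Int) + 1)).sum

-- functional description of the prefix array built by pvPrefix
def pvPList (ts : List (List Int)) (c : Int) : List Int :=
  match ts with
  | [] => [c]
  | s :: r => c :: pvPList r (c + (s.length : Int) + 1)

lemma pvPrefix_build (ts : List (List Int)) :
    ∀ (acc : List Int) (c : Int),
      ts.foldl (fun p s => p ++ [p.getLastD 0 + (s.length : Int) + 1]) (acc ++ [c]) =
        acc ++ pvPList ts c := by
  induction ts with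
  | nil => intro acc c; simp [pvPList]
  | cons s r ih =>
    intro acc c
    simp only [List.foldl, pvPList]
    have h1 : (acc ++ [c]).getLastD 0 = c := by simp
    rw [h1]
    rw [ih (acc ++ [c]) (c + (s.length : Int) + 1)]
    simp

lemma pvPrefix_eq (ts : List (List Int)) : pvPrefix ts = pvPList ts 0 := by
  have h := pvPrefix_build ts [] 0
  simpa [pvPrefix] using h

lemma pvPList_getD (ts : List (List Int)) :
    ∀ (c : Int) (i : Nat), i ≤ ts.length →
      (pvPList ts c).getD i 0 = c + pvSumL (ts.take i) := by
  induction ts with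
  | nil =>
    intro c i hi
    have h0 : i = 0 := by simpa using hi
    subst h0
    simp [pvPList, pvSumL]
  | cons s r ih =>
    intro c i hi
    cases i with
    | zero => simp [pvPList, pvSumL]
    | succ j =>
      simp only [pvPList, List.getD_cons_succ]
      rw [ih (c + (s.length : Int) + 1) j (by simpa using hi)]
      simp [pvSumL, List.take_succ_cons]
      ring

lemma pvPrefix_getD (ts : List (List Int)) (i : Nat) (hi : i ≤ ts.length) :
    (pvPrefix ts).getD i 0 = pvSumL (ts.take i) := by
  rw [pvPrefix_eq]
  simpa using pvPList_getD ts 0 i hi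

lemma pvSumL_take_succ (ts : List (List Int)) (k : Nat) (hk : k < ts.length) :
    pvSumL (ts.take (k + 1)) = pvSumL (ts.take k) + ((ts.getD k []).length + 1) := by
  have h1 : ts.take (k + 1) = ts.take k ++ [ts[k]] := by
    rw [List.take_add_one]
    simp [List.getElem?_eq_getElem hk]
  rw [h1]
  simp only [pvSumL, List.map_append, List.sum_append, List.map_cons, List.map_nil,
    List.sum_cons, List.sum_nil]
  have h2 : ts.getD k [] = ts[k] := by simp [List.getD, List.getElem?_eq_getElem hk]
  rw [h2]
  ring

-- extending the range by one on the right adds the new sentence's length + 1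
lemma pvNTokens_succ (ts : List (List Int)) (a b : Nat) (h : a ≤ b + 1) :
    pvNTokens ts a (b + 1) = pvNTokens ts a b + ((ts.getD (b + 1) []).length + 1) := by
  unfold pvNTokens
  have h1 : b + 1 + 1 - a = (b + 1 - a) + 1 := by omega
  rw [h1, List.range'_concat, List.foldl_append]
  have h2 : a + (b + 1 - a) = b + 1 := by omega
  simp [h2]

-- A's chunk total is the difference of two prefix sums
lemma pvNTokens_sub (ts : List (List Int)) :
    ∀ (b a : Nat), a ≤ b + 1 → b + 1 ≤ ts.length →
      pvNTokens ts a b = pvSumL (ts.take (b + 1)) - pvSumL (ts.take a) := by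
  intro b
  induction b with
  | zero =>
    intro a ha hb
    by_cases ha0 : a = 0
    · subst ha0
      rw [pvSumL_take_succ ts 0 (by omega)]
      simp [pvNTokens, pvSumL]
    · have : a = 1 := by omega
      subst this
      simp [pvNTokens]
  | succ k ih =>
    intro a ha hb
    by_cases hak : a = k + 2
    · subst hak
      have : k + 1 + 1 - (k + 2) = 0 := by omega
      simp [pvNTokens]
    · have ha' : a ≤ k + 1 := by omega
      rw [pvNTokens_succ ts a k ha', ih a ha' (by omega),
        pvSumL_take_succ ts (k + 1) (by omega)]
      ring

-- A's inner loop with the invariant len = pvNTokens start (i-1) equals B's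
-- prefix-sum advance (same fuel): both stop at the same index, A also carrying i-1.
lemma inner_eq (ts : List (List Int)) (thr : Int) :
    ∀ (fuel start i : Nat) (acc : Int), start + 1 ≤ i → i ≤ ts.length →
      acc = pvNTokens ts start (i - 1) →
      pvAInner ts thr ts.length fuel start (i - 1) i acc =
        (pvBAdv (pvPrefix ts) thr ts.length start fuel i - 1,
         pvBAdv (pvPrefix ts) thr ts.length start fuel i) := by
  intro fuel
  induction fuel with
  | zero => intro start i acc _ _ _; simp [pvAInner, pvBAdv]
  | succ f ih =>
    intro start i acc hsi hin hacc
    simp only [pvAInner, pvBAdv]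
    by_cases hn : i < ts.length
    · -- within bounds: compare the two loop conditions
      have hdiff : (pvPrefix ts).getD (i + 1) 0 - (pvPrefix ts).getD start 0 =
          acc + ((ts.getD i []).length : Int) + 1 := by
        rw [pvPrefix_getD ts (i + 1) (by omega), pvPrefix_getD ts start (by omega), hacc]
        have h1 : (i - 1) + 1 = i := by omega
        rw [pvNTokens_sub ts (i - 1) start (by omega) (by omega), h1,
          pvSumL_take_succ ts i hn]
        ring
      by_cases hc : acc + ((ts.getD i []).length : Int) < thr
      · have hacc' : acc < thr := by
          have : (0 : Int) ≤ ((ts.getD i []).length : Int) := by positivity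
          omega
        have hb : i < ts.length ∧ (pvPrefix ts).getD (i + 1) 0 - (pvPrefix ts).getD start 0 ≤ thr := by
          constructor
          · exact hn
          · omega
        rw [if_pos ⟨hacc', hn⟩, if_pos hc, if_pos hb]
        have hsum : pvNTokens ts start i = acc + (ts.getD i []).length + 1 := by
          have hi : i = (i - 1) + 1 := by omega
          rw [hacc, hi, pvNTokens_succ ts start (i - 1) (by omega), ← hi]
          ring
        have := ih start (i + 1) (pvNTokens ts start i) (by omega) (by omega)
          (by simp)
        simpa [hsum] using this
      · have hb : ¬ (i < ts.length ∧ (pvPrefix ts).getD (i + 1) 0 - (pvPrefix ts).getD start 0 ≤ thr) := by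
          intro h
          rw [hdiff] at h
          omega
        rw [if_neg hb]
        by_cases h1 : acc < thr ∧ i < ts.length
        · rw [if_pos h1, if_neg hc]
        · rw [if_neg h1]
    · have hb : ¬ (i < ts.length ∧ (pvPrefix ts).getD (i + 1) 0 - (pvPrefix ts).getD start 0 ≤ thr) := by
        intro h; exact hn h.1
      have h1 : ¬ (acc < thr ∧ i < ts.length) := by
        intro h; exact hn h.2
      rw [if_neg h1, if_neg hb]

lemma pvBAdv_ub (P : List Int) (thr : Int) (n start : Nat) :
    ∀ (fuel i : Nat), i ≤ n → pvBAdv P thr n start fuel i ≤ n := by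
  intro fuel
  induction fuel with
  | zero => intro i hi; simpa [pvBAdv] using hi
  | succ f ih =>
    intro i hi
    simp only [pvBAdv]
    split
    · exact ih (i + 1) (by omega)
    · exact hi

lemma outer_eq (ts : List (List Int)) (thr : Int) :
    ∀ (fuel i : Nat), i ≤ ts.length →
      pvAOuter ts thr ts.length fuel i = pvBLoop (pvPrefix ts) thr ts.length fuel i := by
  intro fuel
  induction fuel with
  | zero => intro i _; rfl
  | succ f ih =>
    intro i hi
    simp only [pvAOuter, pvBLoop]
    by_cases h : i < ts.length
    · rw [if_pos h, if_pos h]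
      have hin := inner_eq ts thr (ts.length + 1) i (i + 1) (pvNTokens ts i i)
        (by omega) (by omega) (by simp)
      simp only [Nat.add_sub_cancel] at hin
      rw [hin, ih _ (pvBAdv_ub (pvPrefix ts) thr ts.length i (ts.length + 1) (i + 1) (by omega))]
    · rw [if_neg h, if_neg h]

-- ===== VERDICT (by name: the statement is the Claim_ definition above) =====
theorem core_sentences_idx_spec : Claim_equal_core_sentences_idx := by
  intro ts M m _
  unfold Spec_core_sentences_idx core_sentences_idx core_sentences_idx_alt
  exact outer_eq ts (M - m - 2) (ts.length + 1) 0 (by omega)
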